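-- pv_equiv track=rewrite | github.com/HSZemi/mccommands | 1.8/makeIronFarm_18.py | sub_build_cstring
-- ===== SOURCE A (Python) =====
-- def sub_build_cstring(commands):
-- 	if(len(commands) > 0):
-- 		string = 'Block:"redstone_block",Time:1,Riding:{id: FallingSand,Block:"command_block",Time:1,TileEntityData:{Command:'
-- 		string += commands.pop()
-- 		string += '},Riding:{id:FallingSand,'
-- 		string += sub_build_cstring(commands)
-- 		string += '}}'
-- 		return string
-- 	else:
-- 		return 'Block:"air",Time:1'
-- ===== SOURCE B (Python) =====
-- def sub_build_cstring(commands):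
-- 	n = len(commands)
-- 	parts = []
-- 	while commands:
-- 		parts.append('Block:"redstone_block",Time:1,Riding:{id: FallingSand,Block:"command_block",Time:1,TileEntityData:{Command:' + commands.pop() + '},Riding:{id:FallingSand,')
-- 	parts.append('Block:"air",Time:1')
-- 	parts.append('}}' * n)
-- 	return ''.join(parts)
-- ===== Notes on version B (the rewrite author's own statement) =====
-- stated objective: faster
-- what changed: Replaces A's self-recursion that nests the string level by level with a flat iterative build: a parts list collected by popping commands from the back, plus the air base and '}}'*n closing run, joined once.
import Mathlib
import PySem

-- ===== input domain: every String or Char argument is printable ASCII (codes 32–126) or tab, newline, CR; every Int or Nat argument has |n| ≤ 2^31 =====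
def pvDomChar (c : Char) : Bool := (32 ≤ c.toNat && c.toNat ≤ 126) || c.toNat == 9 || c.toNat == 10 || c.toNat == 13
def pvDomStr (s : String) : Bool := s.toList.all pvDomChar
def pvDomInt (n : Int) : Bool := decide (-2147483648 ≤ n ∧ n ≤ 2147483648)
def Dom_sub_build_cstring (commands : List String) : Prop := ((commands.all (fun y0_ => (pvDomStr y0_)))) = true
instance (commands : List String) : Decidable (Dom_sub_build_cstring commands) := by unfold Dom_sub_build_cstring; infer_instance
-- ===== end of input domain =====

-- B builds the result iteratively as a flat parts list (popping commands from the back) joined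
-- once, instead of A's self-recursive nesting; equivalence is about the RETURN value (both
-- Pythons also empty the `commands` list in place).

-- ===== PORT A =====
-- A: if commands nonempty, pop the last command, recurse on the rest, wrap in braces.
def sub_build_cstring (commands : List String) : String :=
  if h : commands.length > 0 then
    "Block:\"redstone_block\",Time:1,Riding:{id: FallingSand,Block:\"command_block\",Time:1,TileEntityData:{Command:"
      ++ commands.getLast (by intro hn; simp [hn] at h)
      ++ "},Riding:{id:FallingSand,"
      ++ sub_build_cstring commands.dropLast
      ++ "}}"
  else
    "Block:\"air\",Time:1"
termination_by commands.length
decreasing_by simp [List.length_dropLast]; omega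

-- ===== PORT B =====
-- the while-pop loop: each iteration consumes the last element, i.e. it traverses the reverse
def sub_build_cstring_alt (commands : List String) : String :=
  let n := commands.length
  let parts := commands.reverse.foldl
    (fun acc c => acc ++ ["Block:\"redstone_block\",Time:1,Riding:{id: FallingSand,Block:\"command_block\",Time:1,TileEntityData:{Command:" ++ c ++ "},Riding:{id:FallingSand,"]) []
  String.join (parts ++ ["Block:\"air\",Time:1", String.join (List.replicate n "}}")])

-- ===== PRECONDITION & SPEC =====
def Spec_sub_build_cstring (commands : List String) (out : String) : Prop := out = sub_build_cstring_alt commands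
instance (commands : List String) (out : String) : Decidable (Spec_sub_build_cstring commands out) := by unfold Spec_sub_build_cstring; infer_instance

-- ===== CLAIM (what is proved, stated in full; the proofs are below) =====
def Claim_equal_sub_build_cstring : Prop := ∀ (commands : List String), Dom_sub_build_cstring commands → Spec_sub_build_cstring commands (sub_build_cstring commands)

-- ===== LEMMAS AND PROOFS =====

theorem pv_foldl_assoc (a b : String) (l : List String) :
    l.foldl (· ++ ·) (a ++ b) = a ++ l.foldl (· ++ ·) b := by
  induction l generalizing b with
  | nil => rfl
  | cons x xs ih => simpa [String.append_assoc] using ih (b ++ x)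

theorem pv_foldl_eq (a : String) (l : List String) :
    l.foldl (· ++ ·) a = a ++ l.foldl (· ++ ·) "" := by
  simpa using pv_foldl_assoc a "" l

theorem pv_key (p c m r : String) (L : List String) :
    L.foldl (· ++ ·) (p ++ (c ++ m)) ++ r
      = p ++ (c ++ (m ++ (L.foldl (· ++ ·) "" ++ r))) := by
  rw [pv_foldl_assoc, pv_foldl_assoc, pv_foldl_eq m]
  simp [String.append_assoc]

theorem pv_alt_snoc (cs : List String) (c : String) :
    sub_build_cstring_alt (cs ++ [c]) =
      "Block:\"redstone_block\",Time:1,Riding:{id: FallingSand,Block:\"command_block\",Time:1,TileEntityData:{Command:"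
        ++ c ++ "},Riding:{id:FallingSand," ++ sub_build_cstring_alt cs ++ "}}" := by
  simp [sub_build_cstring_alt, List.replicate_succ', String.join,
    List.foldl_append, String.append_assoc]
  exact pv_key _ _ _ _ _

theorem pv_main (commands : List String) : sub_build_cstring commands = sub_build_cstring_alt commands := by
  induction commands using List.reverseRecOn with
  | nil =>
      rw [sub_build_cstring]
      simp [sub_build_cstring_alt, String.join]
  | append_singleton cs c ih =>
      rw [sub_build_cstring, pv_alt_snoc]
      simp [ih, String.append_assoc]

-- ===== VERDICT (by name: the statement is the Claim_ definition above) =====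
theorem sub_build_cstring_spec : Claim_equal_sub_build_cstring := by
  intro commands _
  exact pv_main commands
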